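-- pv_equiv track=rewrite | github.com/Nandkishore-04/IPL-2026-Prediction | src/build_live_data.py | partnership_balls
-- ===== SOURCE A (Python) =====
-- def partnership_balls(wicket_series):
--     """Count balls since the last wicket for each ball."""
--     result = []
--     count  = 0
--     for w in wicket_series:
--         count += 1
--         if w == 1:
--             count = 0
--         result.append(count)
--     return result
-- ===== SOURCE B (Python) =====
-- def partnership_balls(wicket_series):
--     """Count balls since the last wicket for each ball."""
--     out = []
--     start = 0
--     for i, w in enumerate(wicket_series):
--         if w == 1:
--             out.extend(range(1, i - start + 1))
--             out.append(0)
--             start = i + 1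
--     out.extend(range(1, len(wicket_series) - start + 1))
--     return out
-- ===== Notes on version B (the rewrite author's own statement) =====
-- stated objective: alternative
-- what changed: Replaces the per-ball running counter with a segment-based construction: B only reacts to wicket balls, emitting each completed partnership segment at once as range(1, len+1) plus a 0, and the open tail segment at the end.
import Mathlib
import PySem

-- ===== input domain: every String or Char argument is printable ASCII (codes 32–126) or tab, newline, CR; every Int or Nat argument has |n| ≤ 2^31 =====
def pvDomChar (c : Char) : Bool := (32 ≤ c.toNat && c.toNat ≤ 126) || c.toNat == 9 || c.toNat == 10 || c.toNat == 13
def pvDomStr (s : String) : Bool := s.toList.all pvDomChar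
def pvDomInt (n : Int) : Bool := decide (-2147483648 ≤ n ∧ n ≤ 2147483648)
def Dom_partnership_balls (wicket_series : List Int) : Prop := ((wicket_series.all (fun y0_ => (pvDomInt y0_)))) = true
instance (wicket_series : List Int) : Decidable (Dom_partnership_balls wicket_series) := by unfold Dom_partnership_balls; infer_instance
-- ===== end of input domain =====

-- B replaces A's per-ball running counter by a segment construction: it only reacts to
-- wicket balls, emitting each whole partnership segment at once via range (alternative decomposition).

-- ===== PORT A =====
-- loop state: (count, result accumulated so far)
def partnership_balls (wicket_series : List Int) : List Int :=
  (wicket_series.foldl (fun (st : Int × List Int) w =>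
      let c := st.1 + 1
      let c := if w == 1 then 0 else c
      (c, st.2 ++ [c])) (0, ([] : List Int))).2

-- ===== PORT B =====
-- loop state: (out, start); on each wicket emit range(1, i-start+1) ++ [0]; tail segment at the end.
def partnership_balls_alt (wicket_series : List Int) : List Int :=
  let st := (PySem.List.enumerate wicket_series).foldl
    (fun (st : List Int × Int) (iw : Int × Int) =>
      if iw.2 == 1 then (st.1 ++ PySem.List.pyRange 1 (iw.1 - st.2 + 1) 1 ++ [(0 : Int)], iw.1 + 1)
      else st) (([] : List Int), (0 : Int))
  st.1 ++ PySem.List.pyRange 1 ((wicket_series.length : Int) - st.2 + 1) 1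

-- ===== PRECONDITION & SPEC =====
def Spec_partnership_balls (wicket_series : List Int) (out : List Int) : Prop := out = partnership_balls_alt wicket_series
instance (wicket_series : List Int) (out : List Int) : Decidable (Spec_partnership_balls wicket_series out) := by unfold Spec_partnership_balls; infer_instance

-- ===== CLAIM (what is proved, stated in full; the proofs are below) =====
def Claim_equal_partnership_balls : Prop := ∀ (wicket_series : List Int), Dom_partnership_balls wicket_series → Spec_partnership_balls wicket_series (partnership_balls wicket_series)

-- ===== LEMMAS AND PROOFS =====

-- named copies of the two loop bodies (definitionally equal to the lambdas in the ports)
def pvAStep : Int × List Int → Int → Int × List Int := fun st w =>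
  let c := st.1 + 1
  let c := if w == 1 then 0 else c
  (c, st.2 ++ [c])

def pvBStep : List Int × Int → Int × Int → List Int × Int := fun st iw =>
  if iw.2 == 1 then (st.1 ++ PySem.List.pyRange 1 (iw.1 - st.2 + 1) 1 ++ [(0 : Int)], iw.1 + 1)
  else st

-- Invariant: A's result so far = B's emitted output ++ the open segment 1 .. i - start,
-- and A's counter is i - start.
theorem pv_key (ws : List Int) (i start : Int) (out : List Int) (h : start ≤ i) :
    (ws.foldl pvAStep (i - start, out ++ PySem.List.pyRange 1 (i - start + 1) 1)).2
    = (fun st : List Int × Int =>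
        st.1 ++ PySem.List.pyRange 1 ((i + ws.length) - st.2 + 1) 1)
        ((PySem.List.enumerate ws i).foldl pvBStep (out, start)) := by
  induction ws generalizing i start out with
  | nil => simp
  | cons w tl ih =>
    rw [PySem.List.enumerate_cons]
    simp only [List.foldl_cons]
    by_cases hw : w = 1
    · have hstep1 : pvAStep (i - start, out ++ PySem.List.pyRange 1 (i - start + 1) 1) w
          = (0, (out ++ PySem.List.pyRange 1 (i - start + 1) 1) ++ [(0 : Int)]) := by
        simp [pvAStep, hw]
      have hstep2 : pvBStep (out, start) (i, w)
          = ((out ++ PySem.List.pyRange 1 (i - start + 1) 1) ++ [(0 : Int)], i + 1) := by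
        simp [pvBStep, hw, List.append_assoc]
      rw [hstep1, hstep2]
      have H := ih (i + 1) (i + 1) ((out ++ PySem.List.pyRange 1 (i - start + 1) 1) ++ [(0 : Int)]) le_rfl
      rw [show (i + 1) - (i + 1) = (0 : Int) from by ring] at H
      rw [show (0 : Int) + 1 = 1 from by ring] at H
      rw [PySem.List.pyRange_one_eq_nil (le_refl (1 : Int)), List.append_nil] at H
      rw [H]
      simp only [List.length_cons, Nat.cast_add, Nat.cast_one]
      rw [show i + ((tl.length : Int) + 1) = (i + 1) + (tl.length : Int) from by ring]
    · have hbe : (w == 1) = false := by simp [hw]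
      have hseg : (out ++ PySem.List.pyRange 1 (i - start + 1) 1) ++ [i - start + 1]
          = out ++ PySem.List.pyRange 1 ((i + 1) - start + 1) 1 := by
        rw [show (i + 1) - start + 1 = (i - start + 1) + 1 from by ring,
            PySem.List.pyRange_one_succ_right (by omega : (1 : Int) ≤ i - start + 1),
            List.append_assoc]
      have hstep1 : pvAStep (i - start, out ++ PySem.List.pyRange 1 (i - start + 1) 1) w
          = ((i + 1) - start, out ++ PySem.List.pyRange 1 ((i + 1) - start + 1) 1) := by
        simp only [pvAStep, hbe, Bool.false_eq_true, if_false]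
        rw [show i - start + 1 = (i + 1) - start from by ring] at hseg ⊢
        rw [hseg]
      have hstep2 : pvBStep (out, start) (i, w) = (out, start) := by
        simp [pvBStep, hbe]
      rw [hstep1, hstep2]
      have H := ih (i + 1) start out (by omega)
      rw [H]
      simp only [List.length_cons, Nat.cast_add, Nat.cast_one]
      rw [show i + ((tl.length : Int) + 1) = (i + 1) + (tl.length : Int) from by ring]

-- ===== VERDICT (by name: the statement is the Claim_ definition above) =====
theorem partnership_balls_spec : Claim_equal_partnership_balls := by
  intro ws _
  show (ws.foldl pvAStep (0, ([] : List Int))).2 = _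
  have H := pv_key ws 0 0 [] le_rfl
  rw [show (0 : Int) - 0 = 0 from by ring] at H
  rw [show (0 : Int) + 1 = 1 from by ring] at H
  rw [PySem.List.pyRange_one_eq_nil (le_refl (1 : Int)), List.append_nil] at H
  rw [show ((0 : Int) + (ws.length : Int)) = (ws.length : Int) from by ring] at H
  exact H
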